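-- pv_equiv track=rewrite | github.com/trumanw/bro-gui | brogui/predictor/utils/chemtools.py | smi_reassign_sites
-- ===== SOURCE A (Python) =====
-- import itertools
--
-- def smi_reassign_sites(smi, sites):
--     """
--     Reassign substituent sites from `*` to with named sites
--
--     Parameters
--     ----------
--     smi : str
--         Input SMILES
--     sites : List[str]
--         SMARTS of substituent sites to replace, such as "[*:1]",
--         "[*:2]", "[*:3]". Can also be sidechains with first atom as
--         connector, but be aware of ring number collision with original
--         SMILES.
--
--     Returns
--     -------
--     smiles_out : List[str]
--         SMILES with substituent sites `*` reassigned.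
--     """
--     smi = smi.replace("*", "[*]")
--     smiles_out = []
--     for sites_perm in itertools.permutations(sites):
--         smi_out = smi
--         for site in sites_perm:
--             smi_out = smi_out.replace("[*]", site, 1)
--         smiles_out.append(smi_out)
--     return smiles_out
-- ===== SOURCE B (Python) =====
-- def smi_reassign_sites(smi, sites):
--     smi = smi.replace("*", "[*]")
--     out = []
--
--     def helper(current, remaining):
--         if not remaining:
--             out.append(current)
--             return
--         for i in range(len(remaining)):
--             helper(current.replace("[*]", remaining[i], 1),
--                    remaining[:i] + remaining[i + 1:])
--
--     helper(smi, list(sites))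
--     return out
-- ===== Notes on version B (the rewrite author's own statement) =====
-- stated objective: alternative
-- what changed: Replaces itertools.permutations plus an inner substitution loop by a single recursive helper that threads the partially-substituted SMILES through the permutation enumeration itself, appending each fully-substituted string when no sites remain.
import Mathlib
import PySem

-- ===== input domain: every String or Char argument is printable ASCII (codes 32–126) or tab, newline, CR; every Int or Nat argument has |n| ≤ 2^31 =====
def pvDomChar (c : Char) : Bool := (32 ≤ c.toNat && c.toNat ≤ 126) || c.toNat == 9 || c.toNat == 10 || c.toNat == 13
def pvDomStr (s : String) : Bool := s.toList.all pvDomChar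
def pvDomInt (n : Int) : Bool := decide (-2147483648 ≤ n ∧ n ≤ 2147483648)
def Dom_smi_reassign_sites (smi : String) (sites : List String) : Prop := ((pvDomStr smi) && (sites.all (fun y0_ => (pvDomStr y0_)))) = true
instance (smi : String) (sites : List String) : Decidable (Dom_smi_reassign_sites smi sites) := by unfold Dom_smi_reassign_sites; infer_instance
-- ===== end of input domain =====

-- B replaces itertools.permutations + inner substitution loop by one recursive helper
-- threading the partially-substituted string (alternative decomposition, same cost).

-- shared primitive: Python's s.replace(old, new, 1); exact for non-empty old
-- (both programs only call it with old = "[*]").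
def replaceOnce (s old new : String) : String :=
  let i := PySem.Chars.find s.toList old.toList
  if i = -1 then s
  else String.mk (s.toList.take i.toNat ++ new.toList ++ s.toList.drop (i.toNat + old.toList.length))

-- ===== PORT A =====
-- itertools.permutations(sites), in itertools' order (pick each index in order, recurse
-- on the rest); fuel = length of the list, exact since eraseIdx drops one element.
def permsA (fuel : Nat) (xs : List String) : List (List String) :=
  match fuel with
  | 0 => [[]]
  | n + 1 =>
    (List.range xs.length).flatMap
      (fun i => (permsA n (xs.eraseIdx i)).map (fun p => xs.getD i "" :: p))

def smi_reassign_sites (smi : String) (sites : List String) : List String :=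
  let smi1 := PySem.Str.replace smi "*" "[*]"
  (permsA sites.length sites).foldl
    (fun acc perm => acc ++ [perm.foldl (fun cur site => replaceOnce cur "[*]" site) smi1]) []

-- ===== PORT B =====
-- helper(current, remaining): emit current when remaining is empty, else for each index i
-- substitute remaining[i] into the first "[*]" and recurse on remaining minus i.
def altHelper (fuel : Nat) (current : String) (remaining : List String) : List String :=
  match fuel with
  | 0 => [current]
  | n + 1 =>
    (List.range remaining.length).flatMap
      (fun i => altHelper n (replaceOnce current "[*]" (remaining.getD i "")) (remaining.eraseIdx i))

def smi_reassign_sites_alt (smi : String) (sites : List String) : List String :=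
  altHelper sites.length (PySem.Str.replace smi "*" "[*]") sites

-- ===== PRECONDITION & SPEC =====
def Spec_smi_reassign_sites (smi : String) (sites : List String) (out : List String) : Prop := out = smi_reassign_sites_alt smi sites
instance (smi : String) (sites : List String) (out : List String) : Decidable (Spec_smi_reassign_sites smi sites out) := by unfold Spec_smi_reassign_sites; infer_instance

-- ===== CLAIM (what is proved, stated in full; the proofs are below) =====
def Claim_equal_smi_reassign_sites : Prop := ∀ (smi : String) (sites : List String), Dom_smi_reassign_sites smi sites → Spec_smi_reassign_sites smi sites (smi_reassign_sites smi sites)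

-- ===== LEMMAS AND PROOFS =====

theorem foldl_append_singleton (g : List String → String) :
    ∀ (l : List (List String)) (acc : List String),
      l.foldl (fun a p => a ++ [g p]) acc = acc ++ l.map g := by
  intro l
  induction l with
  | nil => simp
  | cons x xs ih => intro acc; simp [List.foldl_cons, ih]

theorem altHelper_eq_map (n : Nat) :
    ∀ (xs : List String) (cur : String),
      altHelper n cur xs
        = (permsA n xs).map (fun p => p.foldl (fun c site => replaceOnce c "[*]" site) cur) := by
  induction n with
  | zero => intro xs cur; simp [altHelper, permsA]
  | succ n ih =>
    intro xs cur
    simp only [altHelper, permsA, List.map_flatMap, List.map_map]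
    refine List.flatMap_congr ?_
    intro i _
    rw [ih]
    simp [Function.comp, List.foldl_cons]

-- ===== VERDICT (by name: the statement is the Claim_ definition above) =====
theorem smi_reassign_sites_spec : Claim_equal_smi_reassign_sites := by
  intro smi sites _
  unfold Spec_smi_reassign_sites smi_reassign_sites smi_reassign_sites_alt
  rw [altHelper_eq_map, foldl_append_singleton]
  simp
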